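-- pv_equiv track=rewrite | github.com/dushyant18033/KMap-Solver | HW2_2018033.py | binNext
-- ===== SOURCE A (Python) =====
-- def binNext(string):
-- #Returns next binary number having same number of bits
-- #provided the input is not the largest possible bin no.
--
-- 	n=len(string)
-- 	k=string[::-1].find('0')
-- 	k=n-k-1
-- 	string1=''
-- 	for i in range(n):
-- 		if(i==k):
-- 			string1+='1'
-- 		elif(i>k):
-- 			string1+='0'
-- 		else:
-- 			string1+=string[i]
-- 	return string1
-- ===== SOURCE B (Python) =====
-- def binNext(string):
--     # Locate the last '0' directly and rebuild by slicing instead of a char-by-char loop.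
--     k = string.rfind('0')
--     if k == -1:
--         return string
--     return string[:k] + '1' + '0' * (len(string) - k - 1)
-- ===== Notes on version B (the rewrite author's own statement) =====
-- stated objective: faster
-- what changed: B locates the last zero character directly with str.rfind and rebuilds the result by slicing and string repetition (prefix + '1' + '0'*rest), replacing A's reverse-then-find index arithmetic and its per-character rebuilding loop with three branches per index.
import Mathlib
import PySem

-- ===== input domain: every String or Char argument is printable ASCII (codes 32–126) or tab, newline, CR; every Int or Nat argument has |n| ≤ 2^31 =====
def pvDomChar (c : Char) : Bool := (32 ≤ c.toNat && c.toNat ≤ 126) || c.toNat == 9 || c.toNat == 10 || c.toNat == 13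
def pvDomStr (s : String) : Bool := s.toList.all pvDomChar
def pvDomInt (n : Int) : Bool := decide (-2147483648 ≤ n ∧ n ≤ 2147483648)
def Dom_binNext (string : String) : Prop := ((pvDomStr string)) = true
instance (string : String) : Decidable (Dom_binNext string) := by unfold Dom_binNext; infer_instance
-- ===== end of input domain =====

-- B replaces A's reverse-find + per-character rebuilding loop by rfind of the last zero plus slicing; same return value, measured faster in a timing run.

-- ===== PORT A =====
def binNext (string : String) : String :=
  let cs := string.toList
  let n : Int := PySem.Chars.len cs
  -- string[::-1]: slice with step -1 never raises, so .getD [] is exact (PySem.List.slice?_none_none_neg_one)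
  let rev := (PySem.List.slice? cs none none (-1)).getD []
  let k := n - PySem.Chars.find rev ['0'] - 1
  -- string[i] with i ∈ range(n) is always in range, so pyGetD with a dummy default is exact
  String.ofList ((PySem.List.pyRange 0 n 1).foldl
    (fun acc i =>
      if i = k then acc ++ ['1']
      else if i > k then acc ++ ['0']
      else acc ++ [PySem.List.pyGetD cs i ' ']) [])

-- ===== PORT B =====
def binNext_alt (string : String) : String :=
  let cs := string.toList
  let k := PySem.Chars.rfind cs ['0']
  if k = -1 then string
  else
    String.ofList (PySem.List.slice cs none (some k) ++ ['1']
      ++ List.replicate (PySem.Chars.len cs - k - 1).toNat '0')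

-- ===== PRECONDITION & SPEC =====
def Spec_binNext (string : String) (out : String) : Prop := out = binNext_alt string
instance (string : String) (out : String) : Decidable (Spec_binNext string out) := by unfold Spec_binNext; infer_instance

-- ===== CLAIM (what is proved, stated in full; the proofs are below) =====
def Claim_equal_binNext : Prop := ∀ (string : String), Dom_binNext string → Spec_binNext string (binNext string)

-- ===== LEMMAS AND PROOFS =====

-- [a] is a prefix of l exactly when l starts with a
theorem singleton_isPrefixOf_iff (a : Char) (l : List Char) :
    [a].isPrefixOf l = true ↔ l.head? = some a := by
  rw [List.isPrefixOf_iff_prefix]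
  cases l with
  | nil => simp
  | cons x xs => simp [List.cons_prefix_cons, eq_comm]

theorem singleton_isPrefixOf_drop_iff (a : Char) (l : List Char) (i : Nat) :
    [a].isPrefixOf (l.drop i) = true ↔ l[i]? = some a := by
  rw [singleton_isPrefixOf_iff, List.head?_drop]

-- rfind.go returns -1 when the character never occurs
theorem rfind_go_eq_neg_one (cs : List Char) (m : Nat)
    (h : ∀ i : Nat, cs[i]? ≠ some '0') :
    PySem.Chars.rfind.go cs ['0'] m = -1 := by
  induction m with
  | zero =>
      have hnp : ¬ ['0'].isPrefixOf cs = true := by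
        intro hp
        exact h 0 ((singleton_isPrefixOf_drop_iff '0' cs 0).1 (by simpa using hp))
      simp only [PySem.Chars.rfind.go]
      rw [if_neg hnp]
  | succ j ih =>
      have hnp : ¬ ['0'].isPrefixOf (cs.drop (j + 1)) = true := by
        intro hp
        exact h (j + 1) ((singleton_isPrefixOf_drop_iff '0' cs (j + 1)).1 hp)
      simp only [PySem.Chars.rfind.go]
      rw [if_neg hnp]
      exact ih

-- rfind.go returns the last index k of '0' once m is at or beyond k
theorem rfind_go_eq_last (cs : List Char) (k : Nat)
    (hk : cs[k]? = some '0') :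
    ∀ m : Nat, k ≤ m → (∀ i : Nat, k < i → i ≤ m → cs[i]? ≠ some '0') →
    PySem.Chars.rfind.go cs ['0'] m = (k : Int) := by
  intro m
  induction m with
  | zero =>
      intro hkm _
      have hk0 : k = 0 := Nat.le_zero.mp hkm
      subst hk0
      have hp : ['0'].isPrefixOf cs = true := by
        simpa using (singleton_isPrefixOf_drop_iff '0' cs 0).2 hk
      simp only [PySem.Chars.rfind.go]
      rw [if_pos hp]
      simp
  | succ j ih =>
      intro hkm hlast
      by_cases hkj : k = j + 1
      · subst hkj
        have hp : ['0'].isPrefixOf (cs.drop (j + 1)) = true :=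
          (singleton_isPrefixOf_drop_iff '0' cs (j + 1)).2 hk
        simp only [PySem.Chars.rfind.go]
        rw [if_pos hp]
      · have hnp : ¬ ['0'].isPrefixOf (cs.drop (j + 1)) = true := by
          intro hp
          exact hlast (j + 1) (by omega) (by omega)
            ((singleton_isPrefixOf_drop_iff '0' cs (j + 1)).1 hp)
        simp only [PySem.Chars.rfind.go]
        rw [if_neg hnp]
        exact ih (by omega) (fun i hi hij => hlast i hi (by omega))

theorem binNext_spec_aux : ∀ (string : String), binNext string = binNext_alt string := by
  intro string
  unfold binNext binNext_alt
  simp only [PySem.List.slice?_none_none_neg_one, Option.getD_some, PySem.Chars.len]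
  set cs := string.toList with hcs
  set n : Nat := cs.length with hn
  by_cases hmem : '0' ∈ cs
  · -- there is a zero; j0 = index of the first '0' in the reversed list
    have hinf : ['0'] <:+: cs.reverse :=
      (List.singleton_infix_iff '0' cs.reverse).mpr (List.mem_reverse.mpr hmem)
    have hfind_nonneg : 0 ≤ PySem.Chars.find cs.reverse ['0'] :=
      (PySem.Chars.find_nonneg_iff _ _).2 hinf
    obtain ⟨hpref, hmin⟩ := PySem.Chars.find_spec hfind_nonneg
    set j0 : Nat := (PySem.Chars.find cs.reverse ['0']).toNat with hj0
    have hrev_get : cs.reverse[j0]? = some '0' := by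
      rw [← singleton_isPrefixOf_drop_iff]
      exact List.isPrefixOf_iff_prefix.mpr hpref
    have hj0lt : j0 < n := by
      by_contra h
      rw [List.getElem?_eq_none (by simpa using Nat.le_of_not_lt h)] at hrev_get
      simp at hrev_get
    set k : Nat := n - 1 - j0 with hkdef
    have hklt : k < n := by omega
    have hkget : cs[k]? = some '0' := by
      rw [List.getElem?_reverse (by omega)] at hrev_get
      exact hrev_get
    have hlast : ∀ i : Nat, k < i → cs[i]? ≠ some '0' := by
      intro i hi hcontra
      have hin : i < n := by
        by_contra h
        rw [List.getElem?_eq_none (by simpa using Nat.le_of_not_lt h)] at hcontra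
        simp at hcontra
      have hblock : ¬ ['0'] <+: cs.reverse.drop (n - 1 - i) := hmin (n - 1 - i) (by omega)
      apply hblock
      apply List.isPrefixOf_iff_prefix.mp
      rw [singleton_isPrefixOf_drop_iff, List.getElem?_reverse (by omega)]
      convert hcontra using 2
      omega
    have hrfind : PySem.Chars.rfind cs ['0'] = (k : Int) := by
      unfold PySem.Chars.rfind
      exact rfind_go_eq_last cs k hkget n (by omega) (fun i hi _ => hlast i hi)
    have hA_k : (n : Int) - PySem.Chars.find cs.reverse ['0'] - 1 = (k : Int) := by
      have hfj : PySem.Chars.find cs.reverse ['0'] = (j0 : Int) := by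
        rw [hj0, Int.toNat_of_nonneg hfind_nonneg]
      rw [hfj]
      omega
    rw [hrfind, hA_k, if_neg (by omega)]
    congr 1
    -- rewrite A's foldl as a map, then compare the two lists elementwise
    have hfun : (fun (acc : List Char) (i : Int) =>
        if i = (k : Int) then acc ++ ['1']
        else if i > (k : Int) then acc ++ ['0']
        else acc ++ [PySem.List.pyGetD cs i ' ']) =
        (fun acc i => acc ++ [if i = (k : Int) then '1'
          else if i > (k : Int) then '0' else PySem.List.pyGetD cs i ' ']) := by
      funext acc i
      split_ifs <;> rfl
    rw [hfun, PySem.List.foldl_append_singleton_eq_map, List.nil_append,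
        PySem.List.pyRange_one, List.map_map,
        PySem.List.slice_to cs (by omega)]
    have h1 : ((n : Int) - 0).toNat = n := by omega
    have h2 : ((k : Int)).toNat = k := by omega
    have h3 : ((n : Int) - (k : Int) - 1).toNat = n - k - 1 := by omega
    rw [h1, h2, h3]
    have hlen_take : (List.take k cs).length = k := by
      rw [List.length_take]
      omega
    apply List.ext_getElem
    · simp [hlen_take]
      omega
    · intro j hj hj'
      have hjn : j < n := by simpa using hj
      simp only [List.getElem_map, List.getElem_range, Function.comp_apply, zero_add]
      by_cases h1' : j = k
      · subst h1'
        rw [if_pos rfl]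
        rw [List.getElem_append_left
            (by simp only [List.length_append, hlen_take, List.length_singleton]; omega)]
        rw [List.getElem_append_right (by omega)]
        simp [hlen_take]
      · by_cases h2' : k < j
        · rw [if_neg (by exact_mod_cast h1'), if_pos (by exact_mod_cast h2')]
          rw [List.getElem_append_right
            (by simp only [List.length_append, hlen_take, List.length_singleton]; omega)]
          simp
        · have h3' : j < k := by omega
          rw [if_neg (by exact_mod_cast h1'),
              if_neg (by exact_mod_cast (not_lt.mpr (Nat.le_of_lt h3') : ¬ (k : Nat) < j))]
          rw [List.getElem_append_left
            (by simp only [List.length_append, hlen_take, List.length_singleton]; omega)]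
          rw [List.getElem_append_left (by omega)]
          rw [List.getElem_take]
          rw [PySem.List.pyGetD_natCast]
          simp [List.getD_eq_getElem?_getD,
            List.getElem?_eq_getElem (show j < cs.length by omega)]
  · -- no zero anywhere: both sides return the input unchanged
    have hno : ∀ i : Nat, cs[i]? ≠ some '0' := by
      intro i hcontra
      exact hmem (List.mem_of_getElem? hcontra)
    have hrfind : PySem.Chars.rfind cs ['0'] = -1 := by
      unfold PySem.Chars.rfind
      exact rfind_go_eq_neg_one cs n hno
    have hfind : PySem.Chars.find cs.reverse ['0'] = -1 := by
      rw [PySem.Chars.find_eq_neg_one_iff]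
      intro hinf
      exact hmem (List.mem_reverse.mp ((List.singleton_infix_iff '0' cs.reverse).mp hinf))
    rw [hrfind, hfind, if_pos rfl]
    -- A's loop: every index satisfies i < n - (-1) - 1 = n, so it just copies the characters
    have hfun : ∀ (acc : List Char), ∀ i ∈ PySem.List.pyRange 0 (n : Int) 1,
        (if i = (n : Int) - (-1) - 1 then acc ++ ['1']
         else if i > (n : Int) - (-1) - 1 then acc ++ ['0']
         else acc ++ [PySem.List.pyGetD cs i ' ']) = acc ++ [PySem.List.pyGetD cs i ' '] := by
      intro acc i hi
      have hmem' := (PySem.List.mem_pyRange_one).1 hi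
      rw [if_neg (by omega), if_neg (by omega)]
    have hloop : (PySem.List.pyRange 0 (n : Int) 1).foldl
        (fun acc i =>
          if i = (n : Int) - (-1) - 1 then acc ++ ['1']
          else if i > (n : Int) - (-1) - 1 then acc ++ ['0']
          else acc ++ [PySem.List.pyGetD cs i ' ']) [] = cs := by
      rw [PySem.List.foldl_congr_mem _ _ _ _ hfun,
          PySem.List.foldl_append_singleton_eq_map, List.nil_append]
      exact PySem.List.map_pyGetD_pyRange_zero' cs ' '
    rw [hloop]
    exact String.ofList_toList

-- ===== VERDICT (by name: the statement is the Claim_ definition above) =====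
theorem binNext_spec : Claim_equal_binNext := by
  intro string _
  unfold Spec_binNext
  exact binNext_spec_aux string
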